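-- pv_equiv track=rewrite | github.com/zortenburger/MIMUW | 5.SEM/BSK/zad4/skrypt.py | check_a
-- ===== SOURCE A (Python) =====
-- def check_a(a, s, m, i):
--     xor = (1 << i) - 1
--     for j in range(1, 5):
--         for k in range(j + 1, 5):
--             lewa = s[j] ^ s[k]
--             prawa = (s[j - 1] * a) ^ (s[k - 1] * a)
--             if lewa & xor != prawa & xor:
--                 return False
--     return True
-- ===== SOURCE B (Python) =====
-- def check_a(a, s, m, i):
--     # Single flat pass: all six pairwise masked-XOR constraints hold iff the
--     # four derived values t_j = (s[j] ^ (s[j-1]*a)) & xor are all equal.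
--     xor = (1 << i) - 1
--     first = (s[1] ^ (s[0] * a)) & xor
--     for j in range(2, 5):
--         if (s[j] ^ (s[j - 1] * a)) & xor != first:
--             return False
--     return True
-- ===== Notes on version B (the rewrite author's own statement) =====
-- stated objective: simpler
-- what changed: Replaces the nested all-pairs scan (6 masked-XOR comparisons over j<k) by a single flat pass comparing the four derived values t_j = (s[j] ^ (s[j-1]*a)) & xor against the first one, using the identity that the pairwise constraint (j,k) holds iff t_j == t_k.
import Mathlib
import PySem

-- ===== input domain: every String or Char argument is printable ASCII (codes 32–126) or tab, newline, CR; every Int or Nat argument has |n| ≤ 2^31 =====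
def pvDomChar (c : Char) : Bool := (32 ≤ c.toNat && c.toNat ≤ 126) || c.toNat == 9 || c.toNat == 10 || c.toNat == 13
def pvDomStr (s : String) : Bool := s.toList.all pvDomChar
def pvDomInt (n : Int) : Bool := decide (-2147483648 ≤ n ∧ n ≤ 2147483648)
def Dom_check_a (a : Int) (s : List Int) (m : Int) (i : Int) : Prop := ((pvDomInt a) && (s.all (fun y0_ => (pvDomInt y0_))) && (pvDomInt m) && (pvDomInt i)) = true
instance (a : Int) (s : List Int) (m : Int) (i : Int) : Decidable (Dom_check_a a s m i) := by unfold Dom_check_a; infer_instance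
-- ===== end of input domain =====

-- B replaces A's nested all-pairs masked-XOR scan by one flat pass over four derived
-- values, all compared to the first (objective: simpler).

-- ===== PORT A =====
-- literal port of A: nested loops for j in range(1,5), k in range(j+1,5); the early
-- 'return False' makes the loop nest exactly List.all over the ranges
def check_a (a : Int) (s : List Int) (m : Int) (i : Int) : Bool :=
  let xorm : Int := 1 <<< i.toNat - 1
  (PySem.List.pyRange 1 5 1).all fun j =>
    (PySem.List.pyRange (j + 1) 5 1).all fun k =>
      let lewa := PySem.Int.bxor (PySem.List.pyGetD s j 0) (PySem.List.pyGetD s k 0)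
      let prawa := PySem.Int.bxor (PySem.List.pyGetD s (j - 1) 0 * a)
                     (PySem.List.pyGetD s (k - 1) 0 * a)
      PySem.Int.band lewa xorm == PySem.Int.band prawa xorm

-- ===== PORT B =====
-- literal port of Source B: first = t(1); single loop for j in range(2,5) with early return
def check_a_alt (a : Int) (s : List Int) (m : Int) (i : Int) : Bool :=
  let xorm : Int := 1 <<< i.toNat - 1
  let t := fun (j : Int) =>
    PySem.Int.band (PySem.Int.bxor (PySem.List.pyGetD s j 0)
      (PySem.List.pyGetD s (j - 1) 0 * a)) xorm
  let first := t 1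
  (PySem.List.pyRange 2 5 1).all fun j => t j == first

-- ===== PRECONDITION & SPEC =====
-- Pre_ is exactly the set of inputs on which Python A returns (elsewhere it raises):
-- i must be nonnegative (1 << i raises ValueError otherwise), and either the list has
-- the full 5 elements, or (length 3 or 4) one of the pairwise constraints A checks
-- before its first out-of-range access already fails, so A exits early with False.
def Pre_check_a (a : Int) (s : List Int) (m : Int) (i : Int) : Prop :=
  0 ≤ i ∧
  (5 ≤ s.length ∨
    (3 ≤ s.length ∧
      (PySem.Int.band (PySem.Int.bxor (s.getD 1 0) (s.getD 2 0)) ((1 : Int) <<< i.toNat - 1) ≠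
         PySem.Int.band (PySem.Int.bxor (s.getD 0 0 * a) (s.getD 1 0 * a)) ((1 : Int) <<< i.toNat - 1) ∨
       (4 ≤ s.length ∧
        PySem.Int.band (PySem.Int.bxor (s.getD 1 0) (s.getD 3 0)) ((1 : Int) <<< i.toNat - 1) ≠
          PySem.Int.band (PySem.Int.bxor (s.getD 0 0 * a) (s.getD 2 0 * a)) ((1 : Int) <<< i.toNat - 1)))))
instance (a : Int) (s : List Int) (m : Int) (i : Int) : Decidable (Pre_check_a a s m i) := by unfold Pre_check_a; infer_instance
def pvWitness_check_a : Int × List Int × Int × Int := (3, [1, 3, 9, 27, 81], 0, 4)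

def Spec_check_a (a : Int) (s : List Int) (m : Int) (i : Int) (out : Bool) : Prop := out = check_a_alt a s m i
instance (a : Int) (s : List Int) (m : Int) (i : Int) (out : Bool) : Decidable (Spec_check_a a s m i out) := by unfold Spec_check_a; infer_instance

-- ===== CLAIM (what is proved, stated in full; the proofs are below) =====
def Claim_equal_check_a : Prop := ∀ (a : Int) (s : List Int) (m : Int) (i : Int), Dom_check_a a s m i → Pre_check_a a s m i → Spec_check_a a s m i (check_a a s m i)

-- ===== LEMMAS AND PROOFS =====

-- m - (m &&& n) is exactly the bitwise difference (needed to bridge PySem.Int.band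
-- with core Int.land on mixed-sign arguments)
theorem sub_and_eq_ldiff (m : Nat) : ∀ n : Nat, m - (m &&& n) = m.ldiff n := by
  induction m using Nat.binaryRec with
  | zero => intro n; simp [Nat.ldiff, Nat.bitwise_zero_left]
  | bit b m ih =>
    intro n
    cases n using Nat.bitCasesOn with
    | bit b2 n2 =>
      rw [Nat.land_bit, Nat.ldiff_bit]
      have h1 := ih n2
      have h2 : m &&& n2 ≤ m := Nat.and_le_left
      simp only [Nat.bit_val]
      cases b <;> cases b2 <;> simp <;> omega

theorem bxor_eq_xor (a b : Int) : PySem.Int.bxor a b = Int.xor a b := by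
  rcases a with m | m <;> rcases b with n | n <;>
    simp [PySem.Int.bxor, Int.xor, Int.negSucc_eq] <;> omega

theorem band_eq_land (a b : Int) : PySem.Int.band a b = Int.land a b := by
  rcases a with m | m <;> rcases b with n | n <;>
    simp [PySem.Int.band, Int.land, Int.negSucc_eq, sub_and_eq_ldiff] <;> omega

-- two integers with identical bits (in Int.testBit's sense) are equal
theorem int_testBit_ext {a b : Int} (h : ∀ k, a.testBit k = b.testBit k) : a = b := by
  have big : ∀ (x y : Nat), x.testBit (x + y) = false := by
    intro x y
    exact Nat.testBit_eq_false_of_lt (lt_of_lt_of_le Nat.lt_two_pow_self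
      (Nat.pow_le_pow_right (by norm_num) (Nat.le_add_right _ _)))
  rcases a with m | m <;> rcases b with n | n
  · exact congrArg _ (Nat.eq_of_testBit_eq fun k => by simpa [Int.testBit] using h k)
  · exfalso
    have := h (m + n)
    simp [Int.testBit, big m n] at this
    rw [Nat.add_comm] at this
    simp [big n m] at this
  · exfalso
    have := h (m + n)
    simp [Int.testBit, big m n] at this
    rw [Nat.add_comm m n] at this
    simp [big n m] at this
  · have : m = n := Nat.eq_of_testBit_eq fun k => by
      have := h k; simp [Int.testBit] at this; exact this
    rw [this]

-- the XOR shuffle under a mask: (p^q)&x = (r^t)&x → (p^r)&x = (q^t)&x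
theorem mask_xor_swap (p q r t x : Int)
    (h : Int.land (Int.xor p q) x = Int.land (Int.xor r t) x) :
    Int.land (Int.xor p r) x = Int.land (Int.xor q t) x := by
  apply int_testBit_ext; intro k
  have hk := congrArg (Int.testBit · k) h
  simp only [Int.testBit_land, Int.testBit_lxor] at hk ⊢
  revert hk
  cases p.testBit k <;> cases q.testBit k <;> cases r.testBit k <;>
    cases t.testBit k <;> cases x.testBit k <;> decide

-- A's pairwise constraint (u,v vs p,q) holds iff the two derived values agree
theorem pair_iff (u v p q x : Int) :
    (PySem.Int.band (PySem.Int.bxor u v) x = PySem.Int.band (PySem.Int.bxor p q) x) ↔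
    (PySem.Int.band (PySem.Int.bxor u p) x = PySem.Int.band (PySem.Int.bxor v q) x) := by
  simp only [bxor_eq_xor, band_eq_land]
  exact ⟨fun h => mask_xor_swap u v p q x h, fun h => mask_xor_swap u p v q x h⟩

-- ===== VERDICT (by name: the statement is the Claim_ definition above) =====
theorem check_a_spec : Claim_equal_check_a := by
  unfold Claim_equal_check_a Spec_check_a
  intro a s m i _ _
  unfold check_a check_a_alt
  rw [show PySem.List.pyRange 1 5 1 = [1, 2, 3, 4] from by decide,
      show PySem.List.pyRange 2 5 1 = [2, 3, 4] from by decide]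
  simp only [List.all_cons, List.all_nil, Bool.and_true]
  rw [show (1 : Int) + 1 = 2 from rfl, show (2 : Int) + 1 = 3 from rfl,
      show (3 : Int) + 1 = 4 from rfl, show (4 : Int) + 1 = 5 from rfl]
  rw [show PySem.List.pyRange 2 5 1 = [2, 3, 4] from by decide,
      show PySem.List.pyRange 3 5 1 = [3, 4] from by decide,
      show PySem.List.pyRange 4 5 1 = [4] from by decide,
      show PySem.List.pyRange 5 5 1 = [] from by decide]
  simp only [List.all_cons, List.all_nil, Bool.and_true]
  rw [Bool.eq_iff_iff]
  simp only [Bool.and_eq_true, beq_iff_eq]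
  norm_num
  rw [pair_iff (PySem.List.pyGetD s 1 0) (PySem.List.pyGetD s 2 0) ((PySem.List.pyGetD s 0 0) * a) ((PySem.List.pyGetD s 1 0) * a) ((1 : Int) <<< i.toNat - 1)]
  rw [pair_iff (PySem.List.pyGetD s 1 0) (PySem.List.pyGetD s 3 0) ((PySem.List.pyGetD s 0 0) * a) ((PySem.List.pyGetD s 2 0) * a) ((1 : Int) <<< i.toNat - 1)]
  rw [pair_iff (PySem.List.pyGetD s 1 0) (PySem.List.pyGetD s 4 0) ((PySem.List.pyGetD s 0 0) * a) ((PySem.List.pyGetD s 3 0) * a) ((1 : Int) <<< i.toNat - 1)]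
  rw [pair_iff (PySem.List.pyGetD s 2 0) (PySem.List.pyGetD s 3 0) ((PySem.List.pyGetD s 1 0) * a) ((PySem.List.pyGetD s 2 0) * a) ((1 : Int) <<< i.toNat - 1)]
  rw [pair_iff (PySem.List.pyGetD s 2 0) (PySem.List.pyGetD s 4 0) ((PySem.List.pyGetD s 1 0) * a) ((PySem.List.pyGetD s 3 0) * a) ((1 : Int) <<< i.toNat - 1)]
  rw [pair_iff (PySem.List.pyGetD s 3 0) (PySem.List.pyGetD s 4 0) ((PySem.List.pyGetD s 2 0) * a) ((PySem.List.pyGetD s 3 0) * a) ((1 : Int) <<< i.toNat - 1)]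
  constructor
  · rintro ⟨⟨h12, h13, h14⟩, _, _⟩
    exact ⟨h12.symm, h13.symm, h14.symm⟩
  · rintro ⟨h21, h31, h41⟩
    exact ⟨⟨h21.symm, h31.symm, h41.symm⟩, ⟨h21.trans h31.symm, h21.trans h41.symm⟩,
      h31.trans h41.symm⟩
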